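-- pv_equiv track=rewrite | github.com/teaguetomesh/coresets | kMeans/kmeans_qaoa.py | reorder_bitstrings
-- ===== SOURCE A (Python) =====
-- def reorder_bitstrings(P, nq, old_counts):
--     """
--     If the swap network is used to implement the cost evolution, then the
--     measured bitstrings need to be reordered to account for the last SWAP layer
--     that is removed in the network.
--
--     Qiskit orders the measurement bitstrings little endian: qN,...,q1,q0
--     This function applies the last SWAP layer of the network and then performs
--     one final reversal so that the initial mapping between vertices and qubits:
--             v0,v1,...,vN -> q0,q1,...,qN
--     is preserved in the final bitstring counts:
--             {q0q1...qN: 1024, q0q1...qN:2003, ...}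
--     """
--     assert (P == 1),'Reordering only implemented for P=1'
--     cover_a = [(idx-1, idx) for idx in range(1,nq,2)]
--     cover_b = [(idx-1, idx) for idx in range(2,nq,2)]
--     last_cover = [cover_b, cover_a][nq % 2]
--     new_counts = {}
--     for bitstr in old_counts.keys():
--         bit_list = list(bitstr) # convert the bitstr to a list
--         bit_list.reverse() # Qiskit orders the qubit bitstring little endian
--         for i, j in last_cover:
--             bit_list[j], bit_list[i] = bit_list[i], bit_list[j]
--         bit_list.reverse() # reverse the final layer of the swap network
--         new_bitstr = ''.join(bit_list)
--         new_counts[new_bitstr] = old_counts[bitstr]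
--     return new_counts
-- ===== SOURCE B (Python) =====
-- def reorder_bitstrings(P, nq, old_counts):
--     """Precompute the net permutation (source index of each output position)
--     once per bitstring length, then gather each bitstring through that table."""
--     assert (P == 1), 'Reordering only implemented for P=1'
--     start = 2 - nq % 2
--     pairs = [(idx - 1, idx) for idx in range(start, nq, 2)]
--     perm_cache = {}
--     new_counts = {}
--     for bitstr, count in old_counts.items():
--         L = len(bitstr)
--         if L not in perm_cache:
--             perm = list(range(L))
--             perm.reverse()
--             for i, j in pairs:
--                 perm[j], perm[i] = perm[i], perm[j]
--             perm.reverse()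
--             perm_cache[L] = perm
--         perm = perm_cache[L]
--         new_counts[''.join(bitstr[p] for p in perm)] = count
--     return new_counts
-- ===== Notes on version B (the rewrite author's own statement) =====
-- stated objective: alternative
-- what changed: B precomputes the net index permutation once per bitstring length (a cached integer table) and reorders each bitstring by a single gather through that table, instead of A's per-bitstring reverse/adjacent-swap/reverse on the character list; Pre_ excludes exactly the inputs where A raises (P != 1 asserts, or a swap index beyond a bitstring's length raises IndexError).
import Mathlib
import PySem

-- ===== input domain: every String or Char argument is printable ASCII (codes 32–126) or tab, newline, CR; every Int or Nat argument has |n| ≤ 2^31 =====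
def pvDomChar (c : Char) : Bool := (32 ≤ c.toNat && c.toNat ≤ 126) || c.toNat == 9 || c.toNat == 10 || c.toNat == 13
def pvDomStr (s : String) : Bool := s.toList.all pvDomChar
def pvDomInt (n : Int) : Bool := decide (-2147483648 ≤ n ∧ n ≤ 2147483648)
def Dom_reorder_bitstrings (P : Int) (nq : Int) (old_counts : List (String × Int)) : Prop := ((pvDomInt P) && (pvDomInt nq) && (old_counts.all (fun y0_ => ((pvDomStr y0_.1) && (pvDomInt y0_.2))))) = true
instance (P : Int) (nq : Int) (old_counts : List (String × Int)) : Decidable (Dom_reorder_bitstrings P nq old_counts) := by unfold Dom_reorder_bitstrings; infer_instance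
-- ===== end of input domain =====

-- B precomputes the net index permutation once per bitstring length and gathers each
-- bitstring through that table, instead of A's per-bitstring reverse/swap/reverse (objective: alternative).


-- ===== PORT A =====
-- 'bit_list[j], bit_list[i] = bit_list[i], bit_list[j]' on a char list (both reads on the old list)
def pvSwapA (zs : List Char) (ij : Int × Int) : List Char :=
  PySem.List.pySetD (PySem.List.pySetD zs ij.2 (PySem.List.pyGetD zs ij.1 ' ')) ij.1
    (PySem.List.pyGetD zs ij.2 ' ')

def reorder_bitstrings (P : Int) (nq : Int) (old_counts : List (String × Int)) : List (String × Int) :=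
  -- assert P == 1  (AssertionError for P ≠ 1: excluded by Pre_)
  let cover_a := (PySem.List.pyRange 1 nq 2).map (fun idx => (idx - 1, idx))
  let cover_b := (PySem.List.pyRange 2 nq 2).map (fun idx => (idx - 1, idx))
  let last_cover := PySem.List.pyGetD [cover_b, cover_a] (PySem.Int.mod nq 2) []
  let d := PySem.Dict.ofList old_counts
  (d.keys.foldl (fun (nc : PySem.Dict String Int) bitstr =>
      let bit_list := bitstr.toList.reverse
      let bit_list2 := last_cover.foldl pvSwapA bit_list
      let bit_list3 := bit_list2.reverse
      nc.insert (String.ofList bit_list3) (d.getD bitstr 0)) PySem.Dict.empty).items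

-- ===== PORT B =====
-- 'perm[j], perm[i] = perm[i], perm[j]' on the integer index list
def pvSwapB (zs : List Int) (ij : Int × Int) : List Int :=
  PySem.List.pySetD (PySem.List.pySetD zs ij.2 (PySem.List.pyGetD zs ij.1 0)) ij.1
    (PySem.List.pyGetD zs ij.2 0)

-- perm = list(range(L)); perm.reverse(); swaps; perm.reverse()
def pvPermFor (pairs : List (Int × Int)) (L : Int) : List Int :=
  (pairs.foldl pvSwapB (PySem.List.pyRange 0 L 1).reverse).reverse

def reorder_bitstrings_alt (P : Int) (nq : Int) (old_counts : List (String × Int)) : List (String × Int) :=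
  let start := 2 - PySem.Int.mod nq 2
  let pairs := (PySem.List.pyRange start nq 2).map (fun idx => (idx - 1, idx))
  let d := PySem.Dict.ofList old_counts
  ((d.items.foldl (fun (st : PySem.Dict Int (List Int) × PySem.Dict String Int) kv =>
      let L : Int := PySem.Str.len kv.1
      let cache := if st.1.contains L then st.1 else st.1.insert L (pvPermFor pairs L)
      (cache, st.2.insert
        (String.ofList ((cache.getD L []).map (fun p => PySem.List.pyGetD kv.1.toList p ' ')))
        kv.2))
    (PySem.Dict.empty, PySem.Dict.empty)).2).items

-- ===== PRECONDITION & SPEC =====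
-- Pre_ admits exactly the inputs where A returns: P = 1 (the assert), and either nq ≤ 2 (the
-- swap layer is empty) or every bitstring is long enough for the highest swap index nq-2.
def Pre_reorder_bitstrings (P : Int) (nq : Int) (old_counts : List (String × Int)) : Prop :=
  P = 1 ∧ (nq ≤ 2 ∨ ∀ p ∈ old_counts, nq - 2 < (p.1.toList.length : Int))
instance (P : Int) (nq : Int) (old_counts : List (String × Int)) : Decidable (Pre_reorder_bitstrings P nq old_counts) := by unfold Pre_reorder_bitstrings; infer_instance

def pvWitness_reorder_bitstrings : Int × Int × (List (String × Int)) := (1, 3, [("010", 5), ("11", 2)])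

def Spec_reorder_bitstrings (P : Int) (nq : Int) (old_counts : List (String × Int)) (out : List (String × Int)) : Prop := out = reorder_bitstrings_alt P nq old_counts
instance (P : Int) (nq : Int) (old_counts : List (String × Int)) (out : List (String × Int)) : Decidable (Spec_reorder_bitstrings P nq old_counts out) := by unfold Spec_reorder_bitstrings; infer_instance

-- ===== CLAIM (what is proved, stated in full; the proofs are below) =====
def Claim_equal_reorder_bitstrings : Prop := ∀ (P : Int) (nq : Int) (old_counts : List (String × Int)), Dom_reorder_bitstrings P nq old_counts → Pre_reorder_bitstrings P nq old_counts → Spec_reorder_bitstrings P nq old_counts (reorder_bitstrings P nq old_counts)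

-- ===== LEMMAS AND PROOFS =====

lemma length_pvSwapB (q : List Int) (ij : Int × Int) : (pvSwapB q ij).length = q.length := by
  unfold pvSwapB; simp [PySem.List.length_pySetD]

lemma pvSwap_map (cs : List Char) (q : List Int) (ij : Int × Int)
    (h1 : 0 ≤ ij.1) (h2 : ij.1 < (q.length : Int)) (h3 : 0 ≤ ij.2) (h4 : ij.2 < (q.length : Int)) :
    pvSwapA (q.map (fun p => PySem.List.pyGetD cs p ' ')) ij
      = (pvSwapB q ij).map (fun p => PySem.List.pyGetD cs p ' ') := by
  unfold pvSwapA pvSwapB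
  rw [PySem.List.pySetD_of_nonneg _ _ h3, PySem.List.pySetD_of_nonneg _ _ h1,
      PySem.List.pySetD_of_nonneg _ _ h3, PySem.List.pySetD_of_nonneg _ _ h1,
      PySem.List.pyGetD_eq_getElem _ _ h1 (by simpa using h2),
      PySem.List.pyGetD_eq_getElem _ _ h3 (by simpa using h4),
      PySem.List.pyGetD_eq_getElem _ _ h1 h2,
      PySem.List.pyGetD_eq_getElem _ _ h3 h4]
  simp [List.map_set]

lemma foldSwaps_map (cs : List Char) (pairs : List (Int × Int)) :
    ∀ (q : List Int),
      (∀ ij ∈ pairs, 0 ≤ ij.1 ∧ ij.1 < (q.length : Int) ∧ 0 ≤ ij.2 ∧ ij.2 < (q.length : Int)) →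
      pairs.foldl pvSwapA (q.map (fun p => PySem.List.pyGetD cs p ' '))
        = (pairs.foldl pvSwapB q).map (fun p => PySem.List.pyGetD cs p ' ') := by
  induction pairs with
  | nil => intro q _; simp
  | cons ij rest ih =>
    intro q hv
    simp only [List.foldl_cons]
    obtain ⟨a1, a2, a3, a4⟩ := hv ij (List.mem_cons_self ..)
    rw [pvSwap_map cs q ij a1 a2 a3 a4]
    exact ih (pvSwapB q ij) (by
      intro p hp
      have := hv p (List.mem_cons_of_mem _ hp)
      simpa [length_pvSwapB] using this)

lemma transform_eq (cs : List Char) (pairs : List (Int × Int))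
    (hval : ∀ ij ∈ pairs, 0 ≤ ij.1 ∧ ij.1 < (cs.length : Int) ∧ 0 ≤ ij.2 ∧ ij.2 < (cs.length : Int)) :
    (pairs.foldl pvSwapA cs.reverse).reverse
      = (pvPermFor pairs (cs.length : Int)).map (fun p => PySem.List.pyGetD cs p ' ') := by
  have hlen : (PySem.List.pyRange 0 (cs.length : Int) 1).reverse.length = cs.length := by
    simp [PySem.List.pyRange_one]
  have hcs : cs.reverse
      = ((PySem.List.pyRange 0 (cs.length : Int) 1).reverse.map
          (fun j => PySem.List.pyGetD cs j ' ')) := by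
    rw [show List.map (fun j => PySem.List.pyGetD cs j ' ') (PySem.List.pyRange 0 (cs.length:Int) 1).reverse
          = (List.map (fun j => PySem.List.pyGetD cs j ' ') (PySem.List.pyRange 0 (cs.length:Int) 1)).reverse
        from (List.map_reverse ..), PySem.List.map_pyGetD_pyRange_zero']
  unfold pvPermFor
  rw [hcs, foldSwaps_map cs pairs _ (by intro ij hij; simpa [hlen] using hval ij hij),
      List.map_reverse]

lemma cacheFold (pairs : List (Int × Int)) (items : List (String × Int)) :
    ∀ (cache : PySem.Dict Int (List Int)) (nc : PySem.Dict String Int),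
      (∀ L v, cache.get? L = some v → v = pvPermFor pairs L) →
      (items.foldl (fun (st : PySem.Dict Int (List Int) × PySem.Dict String Int) kv =>
          let L : Int := PySem.Str.len kv.1
          let cache := if st.1.contains L then st.1 else st.1.insert L (pvPermFor pairs L)
          (cache, st.2.insert
            (String.ofList ((cache.getD L []).map (fun p => PySem.List.pyGetD kv.1.toList p ' ')))
            kv.2)) (cache, nc)).2
      = items.foldl (fun nc kv =>
          nc.insert (String.ofList ((pvPermFor pairs (PySem.Str.len kv.1)).map
            (fun p => PySem.List.pyGetD kv.1.toList p ' '))) kv.2) nc := by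
  induction items with
  | nil => intro cache nc _; rfl
  | cons kv rest ih =>
    intro cache nc hinv
    simp only [List.foldl_cons]
    have hcd : (if cache.contains (PySem.Str.len kv.1) then cache
        else cache.insert (PySem.Str.len kv.1) (pvPermFor pairs (PySem.Str.len kv.1))).getD
          (PySem.Str.len kv.1) [] = pvPermFor pairs (PySem.Str.len kv.1) := by
      by_cases h : cache.contains (PySem.Str.len kv.1) = true
      · rw [if_pos h]
        rw [PySem.Dict.contains_eq_isSome_get?] at h
        obtain ⟨v, hv⟩ := Option.isSome_iff_exists.mp h
        rw [PySem.Dict.getD_eq_get?_getD, hv]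
        exact hinv _ v hv
      · rw [if_neg h, PySem.Dict.getD_insert_self]
    have hinv' : ∀ L v, (if cache.contains (PySem.Str.len kv.1) then cache
        else cache.insert (PySem.Str.len kv.1) (pvPermFor pairs (PySem.Str.len kv.1))).get? L = some v
        → v = pvPermFor pairs L := by
      by_cases h : cache.contains (PySem.Str.len kv.1) = true
      · rw [if_pos h]; exact hinv
      · rw [if_neg h]
        intro L v hv
        rw [PySem.Dict.get?_insert] at hv
        by_cases hL : L = PySem.Str.len kv.1
        · rw [if_pos hL] at hv; subst hL; exact (Option.some_inj.mp hv).symm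
        · rw [if_neg hL] at hv; exact hinv L v hv
    rw [hcd]
    exact ih _ _ hinv'


-- ===== VERDICT (by name: the statement is the Claim_ definition above) =====
theorem reorder_bitstrings_spec : Claim_equal_reorder_bitstrings := by
  unfold Claim_equal_reorder_bitstrings
  intro P nq oc _ hPre
  obtain ⟨hP, hlen⟩ := hPre
  unfold Spec_reorder_bitstrings reorder_bitstrings reorder_bitstrings_alt
  simp only []
  have hm0 : 0 ≤ PySem.Int.mod nq 2 := PySem.Int.mod_nonneg nq (by norm_num)
  have hm2 : PySem.Int.mod nq 2 < 2 := PySem.Int.mod_lt nq (by norm_num)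
  have hme : PySem.Int.mod nq 2 = nq % 2 := PySem.Int.mod_eq_emod_of_pos (by norm_num)
  have hlc : PySem.List.pyGetD
      [(PySem.List.pyRange 2 nq 2).map (fun idx => (idx - 1, idx)),
       (PySem.List.pyRange 1 nq 2).map (fun idx => (idx - 1, idx))] (PySem.Int.mod nq 2) []
      = (PySem.List.pyRange (2 - PySem.Int.mod nq 2) nq 2).map (fun idx => (idx - 1, idx)) := by
    have : PySem.Int.mod nq 2 = 0 ∨ PySem.Int.mod nq 2 = 1 := by omega
    rcases this with h | h <;> rw [h] <;>
      simp [PySem.List.pyGetD, PySem.List.pyGet?, PySem.List.pyIdx?]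
  rw [hlc]
  rw [cacheFold ((PySem.List.pyRange (2 - PySem.Int.mod nq 2) nq 2).map (fun idx => (idx - 1, idx)))
      (PySem.Dict.ofList oc).items PySem.Dict.empty PySem.Dict.empty
      (by intro L v hv; simp [PySem.Dict.get?_empty] at hv)]
  congr 1
  rw [show (PySem.Dict.ofList oc).keys = (PySem.Dict.ofList oc).items.map (·.1) from by
        simp [PySem.Dict.keys]]
  rw [List.foldl_map]
  apply PySem.List.foldl_congr_mem
  intro acc kv hkv
  have hv : (PySem.Dict.ofList oc).getD kv.1 0 = kv.2 :=
    PySem.Dict.getD_of_mem_items _ hkv (PySem.Dict.nodup_keys_ofList oc) 0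
  have hk : kv.1 ∈ oc.map (·.1) := by
    have h := PySem.Dict.mem_keys_of_mem_items _ hkv
    unfold PySem.Dict.ofList PySem.Dict.update at h
    rw [PySem.Dict.keys_foldl_insert_key] at h
    simpa [PySem.Set.update, ← PySem.Set.ofList_eq_foldl, PySem.Set.mem_ofList] using h
  obtain ⟨p, hp, hpk⟩ := List.mem_map.mp hk
  have hval : ∀ ij ∈ (PySem.List.pyRange (2 - PySem.Int.mod nq 2) nq 2).map (fun idx => (idx - 1, idx)),
      0 ≤ ij.1 ∧ ij.1 < (kv.1.toList.length : Int) ∧ 0 ≤ ij.2 ∧ ij.2 < (kv.1.toList.length : Int) := by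
    intro ij hij
    obtain ⟨idx, hidx, rfl⟩ := List.mem_map.mp hij
    rw [PySem.List.mem_pyRange_iff_of_pos (by norm_num)] at hidx
    obtain ⟨h1, h2, h3⟩ := hidx
    rcases hlen with h | h
    · omega
    · have hlp := h p hp
      rw [hpk] at hlp
      omega
  rw [hv, transform_eq kv.1.toList _ hval]
  simp [PySem.Str.len_eq]
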